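-- pv_equiv track=rewrite | github.com/TracyZhangyr/Search-Engine | WordList.py | common_line_num
-- ===== SOURCE A (Python) =====
-- def common_line_num(l:list) -> list: #l is the list of sets of line numbers, returns the max count of common line numbers
--     d = {}
--     searched_set = set()
--     result = 0
--     counter = 1
--
--     for s in l:
--         for line_num in s:
--             if line_num not in searched_set:
--                 searched_set.add(line_num)
--                 max_lines = 0
--                 for line_num_set in l:
--                     if line_num in line_num_set:
--                         max_lines += 1
--                 if max_lines > result:
--                     result = max_lines
--                     counter = 1
--                 elif max_lines == result:
--                     counter += 1
--
--     return [result, counter]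
-- ===== SOURCE B (Python) =====
-- def common_line_num(l: list) -> list:
--     # Flatten with per-set dedup, count occurrences once, then take max + tie count.
--     flat = [x for s in l for x in dict.fromkeys(s)]
--     counts = {}
--     for x in flat:
--         counts[x] = counts.get(x, 0) + 1
--     vals = list(counts.values())
--     if not vals:
--         return [0, 1]
--     best = max(vals)
--     ties = 0
--     for c in vals:
--         if c == best:
--             ties += 1
--     return [best, ties]
-- ===== Notes on version B (the rewrite author's own statement) =====
-- stated objective: faster
-- what changed: B builds one occurrence dictionary in a single pass over the (per-set deduplicated) flattened input and reads max and tie count off its values, instead of A's per-distinct-value rescans of all sets.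
import Mathlib
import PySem

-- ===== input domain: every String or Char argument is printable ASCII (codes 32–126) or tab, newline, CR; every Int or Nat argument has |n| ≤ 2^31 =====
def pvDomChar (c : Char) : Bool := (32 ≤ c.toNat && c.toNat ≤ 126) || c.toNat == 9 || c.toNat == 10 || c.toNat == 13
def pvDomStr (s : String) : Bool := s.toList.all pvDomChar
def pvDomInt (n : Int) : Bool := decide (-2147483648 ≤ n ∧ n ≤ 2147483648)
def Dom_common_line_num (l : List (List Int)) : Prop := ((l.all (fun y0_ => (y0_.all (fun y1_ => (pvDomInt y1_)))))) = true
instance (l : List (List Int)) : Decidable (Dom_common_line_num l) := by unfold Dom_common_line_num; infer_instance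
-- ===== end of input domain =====

-- B flattens with per-set dedup, counts occurrences in one dictionary pass, and reads max/tie-count
-- off the values, replacing A's rescan of all sets for every distinct value (faster).


-- ===== PORT A =====
def common_line_num (l : List (List Int)) : List Int :=
  let st :=
    l.foldl (fun (st : PySem.Set Int × Int × Int) s =>
      s.foldl (fun (st : PySem.Set Int × Int × Int) line_num =>
        if line_num ∈ st.1 then st
        else
          let searched := PySem.Set.add st.1 line_num
          let max_lines := l.foldl (fun acc line_num_set =>
            if line_num ∈ line_num_set then acc + 1 else acc) 0
          if max_lines > st.2.1 then (searched, max_lines, 1)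
          else if max_lines = st.2.1 then (searched, st.2.1, st.2.2 + 1)
          else (searched, st.2.1, st.2.2)) st)
      (PySem.Set.empty, 0, 1)
  [st.2.1, st.2.2]

-- ===== PORT B =====
def common_line_num_alt (l : List (List Int)) : List Int :=
  let flat := l.flatMap (fun s => PySem.List.dedup s)
  let counts := flat.foldl (fun (d : PySem.Dict Int Int) x => d.insert x (d.getD x 0 + 1)) PySem.Dict.empty
  let vals := counts.values
  match PySem.List.max? vals (fun y => y) with
  | none => [0, 1]
  | some best => [best, vals.foldl (fun t c => if c == best then t + 1 else t) 0]

-- ===== PRECONDITION & SPEC =====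
def Spec_common_line_num (l : List (List Int)) (out : List Int) : Prop := out = common_line_num_alt l
instance (l : List (List Int)) (out : List Int) : Decidable (Spec_common_line_num l out) := by unfold Spec_common_line_num; infer_instance

-- ===== CLAIM (what is proved, stated in full; the proofs are below) =====
def Claim_equal_common_line_num : Prop := ∀ (l : List (List Int)), Dom_common_line_num l → Spec_common_line_num l (common_line_num l)

-- ===== LEMMAS AND PROOFS =====

-- the number of sets of l containing v (the value A's inner scan computes)
def fcnt (l : List (List Int)) (v : Int) : Int := (l.countP (fun s => decide (v ∈ s)) : Int)

-- A's max/tie step on one count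
def mstep (rc : Int × Int) (m : Int) : Int × Int :=
  if m > rc.1 then (m, 1) else if m = rc.1 then (rc.1, rc.2 + 1) else rc

-- the elements of xs not in seen, first occurrences in order
def news (seen : List Int) : List Int → List Int
  | [] => []
  | x :: xs => if x ∈ seen then news seen xs else x :: news (seen ++ [x]) xs

lemma update_eq_append_news (xs : List Int) : ∀ (seen : PySem.Set Int),
    PySem.Set.update seen xs = seen ++ news seen xs := by
  induction xs with
  | nil => intro seen; simp [PySem.Set.update, news]
  | cons x xs ih =>
    intro seen
    by_cases h : x ∈ seen
    · simp [PySem.Set.update_cons, news, h, ih]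
    · simp [PySem.Set.update_cons, news, h, ih]

lemma news_nil_eq_ofList (xs : List Int) : news [] xs = PySem.Set.ofList xs := by
  have := update_eq_append_news xs []
  simpa [PySem.Set.update_nil_left] using this.symm

-- A's inner loop over one flattened stream, from an arbitrary state
lemma A_fold_eq (l : List (List Int)) (xs : List Int) : ∀ (seen : PySem.Set Int) (r c : Int),
    xs.foldl (fun (st : PySem.Set Int × Int × Int) line_num =>
        if line_num ∈ st.1 then st
        else
          let searched := PySem.Set.add st.1 line_num
          let max_lines := l.foldl (fun acc line_num_set =>
            if line_num ∈ line_num_set then acc + 1 else acc) 0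
          if max_lines > st.2.1 then (searched, max_lines, 1)
          else if max_lines = st.2.1 then (searched, st.2.1, st.2.2 + 1)
          else (searched, st.2.1, st.2.2)) (seen, r, c)
      = (PySem.Set.update seen xs, ((news seen xs).map (fcnt l)).foldl mstep (r, c)) := by
  induction xs with
  | nil => intro seen r c; simp [PySem.Set.update, news]
  | cons x xs ih =>
    intro seen r c
    by_cases h : x ∈ seen
    · simp only [List.foldl, h]
      rw [ih, PySem.Set.update_cons, PySem.Set.add_of_mem h]
      simp [news, h]
    · have hml : l.foldl (fun acc line_num_set =>
          if x ∈ line_num_set then acc + 1 else acc) 0 = fcnt l x := by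
        rw [PySem.List.foldl_ite_add_one]; simp [fcnt]
      simp only [List.foldl, if_neg h]
      rw [ih, PySem.Set.update_cons, PySem.Set.add_of_not_mem h]
      simp only [news, if_neg h, List.map_cons, List.foldl_cons, hml, mstep]
      split_ifs <;> rfl

-- running max with base 0 on a list of ≥1 elements
def rmax (ms : List Int) : Int := ms.foldl max 0

lemma le_rmax_of_mem {ms : List Int} {y : Int} (h : y ∈ ms) : y ≤ rmax ms := by
  have := (PySem.List.le_foldl_max ms 0).2
  exact this y h

-- the core max/tie characterisation of A's fold
lemma core (ms : List Int) (hpos : ∀ m ∈ ms, 1 ≤ m) :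
    ms.foldl mstep (0, 1) = (rmax ms, if ms = [] then 1 else (ms.count (rmax ms) : Int)) := by
  induction ms using List.reverseRecOn with
  | nil => simp [rmax]
  | append_singleton ms m ih =>
    have hm : 1 ≤ m := hpos m (by simp)
    have hpos' : ∀ y ∈ ms, 1 ≤ y := fun y hy => hpos y (by simp [hy])
    have hR : rmax (ms ++ [m]) = max (rmax ms) m := by simp [rmax]
    rw [List.foldl_append, ih hpos']
    by_cases hgt : m > rmax ms
    · have hcnt : ms.count m = 0 := by
        rw [List.count_eq_zero]
        intro hmem
        exact absurd (le_rmax_of_mem hmem) (by omega)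
      simp [mstep, hgt, hR, max_eq_right (le_of_lt hgt), List.count_append, hcnt]
    · have hle : m ≤ rmax ms := by omega
      have hne : ms ≠ [] := by
        intro h; subst h; simp [rmax] at hle; omega
      by_cases heq : m = rmax ms
      · have hmax : rmax (ms ++ [m]) = rmax ms := by rw [hR]; omega
        subst heq
        simp [mstep, hmax, hne, List.count_append]
      · have : rmax ms ≠ m := fun h => heq h.symm
        simp [mstep, hgt, heq, hR, max_eq_left hle, hne, List.count_append]

lemma values_counter (xs : List Int) :
    (PySem.Dict.counter xs).values = (PySem.Set.ofList xs).map (fun k => ((xs.count k : Int))) := by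
  show (PySem.Dict.counter xs).items.map (·.2) = _
  rw [PySem.Dict.items_counter]
  simp

lemma ofList_flatMap_dedup (l : List (List Int)) :
    PySem.Set.ofList (l.flatMap (fun s => PySem.List.dedup s)) = PySem.Set.ofList l.flatten := by
  induction l with
  | nil => rfl
  | cons s ls ih =>
    simp only [List.flatMap_cons, List.flatten_cons, PySem.Set.ofList_append,
      PySem.Set.update_eq_append_filter, ih]
    simp

lemma count_flatMap_dedup (l : List (List Int)) (v : Int) :
    ((l.flatMap (fun s => PySem.List.dedup s)).count v : Int) = fcnt l v := by
  induction l with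
  | nil => simp [fcnt]
  | cons s ls ih =>
    simp only [List.flatMap_cons, List.count_append, fcnt, List.countP_cons,
      PySem.List.dedup_eq_ofList] at ih ⊢
    by_cases h : v ∈ s
    · have h1 : (PySem.Set.ofList s).count v = 1 :=
        List.count_eq_one_of_mem (PySem.Set.nodup_ofList s) (by simpa [PySem.Set.mem_ofList] using h)
      simp only [h1, h, decide_true, if_true]
      push_cast
      omega
    · have h0 : (PySem.Set.ofList s).count v = 0 :=
        List.count_eq_zero.mpr (by simpa [PySem.Set.mem_ofList] using h)
      simp only [h0, h, decide_false]
      push_cast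
      omega

lemma fcnt_pos (l : List (List Int)) (v : Int) (h : v ∈ l.flatten) : 1 ≤ fcnt l v := by
  rcases List.mem_flatten.mp h with ⟨s, hs, hv⟩
  have : 0 < l.countP (fun s => decide (v ∈ s)) :=
    List.countP_pos_iff.mpr ⟨s, hs, by simpa using hv⟩
  simp only [fcnt]
  omega

-- ===== VERDICT (by name: the statement is the Claim_ definition above) =====
theorem common_line_num_spec : Claim_equal_common_line_num := by
  unfold Claim_equal_common_line_num
  intro l _
  simp only [Spec_common_line_num, common_line_num, common_line_num_alt, PySem.Set.empty,
    PySem.Dict.foldl_insert_getD_add_one_eq_counter, values_counter, ofList_flatMap_dedup,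
    count_flatMap_dedup]
  rw [← List.foldl_flatten, A_fold_eq l l.flatten [] 0 1, news_nil_eq_ofList]
  have hpos : ∀ m ∈ (PySem.Set.ofList l.flatten).map (fcnt l), 1 ≤ m := by
    intro m hm
    rcases List.mem_map.mp hm with ⟨v, hv, rfl⟩
    exact fcnt_pos l v (by simpa [PySem.Set.mem_ofList] using hv)
  rw [core _ hpos]
  cases hD : (PySem.Set.ofList l.flatten).map (fcnt l) with
  | nil => simp [PySem.List.max?, rmax]
  | cons x t =>
    have hx : 1 ≤ x := hpos x (by rw [hD]; simp)
    have hmax : t.foldl max x = rmax (x :: t) := by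
      simp [rmax, max_eq_right (by omega : (0:Int) ≤ x)]
    rw [PySem.List.max?_id_cons]
    simp only [hmax, PySem.List.foldl_beq_add_one]
    simp
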